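-- pv_equiv track=rewrite | github.com/RANGSHOW/Python | __Algorithm/_Puzzle_Algorithm/Puzzle_02_파티에_참석하기_좋은_시간.py | choose_time
-- ===== SOURCE A (Python) =====
-- def choose_time(t_list):
--     rcount = 0
--     maxcount = time = 0
--     for t in t_list:
--         if t[1] == 'start':
--             rcount = rcount + 1
--         elif t[1] == 'end':
--             rcount = rcount - 1
--         if rcount > maxcount:
--             maxcount = rcount
--             time = t[0]
--     return maxcount, time
-- ===== SOURCE B (Python) =====
-- def choose_time(t_list):
--     # Build the running-count table first, then scan it: max, then first hit.
--     delta = {'start': 1, 'end': -1}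
--     counts = []
--     r = 0
--     for t, tag in t_list:
--         r += delta.get(tag, 0)
--         counts.append((r, t))
--     maxcount = max([c for c, _ in counts], default=0)
--     if maxcount <= 0:
--         return 0, 0
--     time = next(t for c, t in counts if c == maxcount)
--     return maxcount, time
-- ===== Notes on version B (the rewrite author's own statement) =====
-- stated objective: alternative
-- what changed: Replaces A's fused single pass with running max/time state by a build-the-running-count-table-then-scan decomposition: map tags to deltas, accumulate the prefix counts paired with times, take the max (clamped via a <=0 early return), then find the first time reaching it.
import Mathlib
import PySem

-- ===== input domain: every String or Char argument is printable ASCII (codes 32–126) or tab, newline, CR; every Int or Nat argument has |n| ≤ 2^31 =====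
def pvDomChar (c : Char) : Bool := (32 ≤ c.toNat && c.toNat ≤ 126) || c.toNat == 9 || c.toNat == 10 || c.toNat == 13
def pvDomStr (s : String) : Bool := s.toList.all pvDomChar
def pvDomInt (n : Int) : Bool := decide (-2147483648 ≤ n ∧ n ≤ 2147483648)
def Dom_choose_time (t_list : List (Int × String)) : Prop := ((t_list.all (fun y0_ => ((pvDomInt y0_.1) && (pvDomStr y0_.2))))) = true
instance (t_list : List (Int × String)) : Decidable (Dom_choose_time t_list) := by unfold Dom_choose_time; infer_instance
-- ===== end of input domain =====

-- B replaces A's fused single pass by a build-the-running-count-table-then-scan decomposition (alternative, same cost).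

-- ===== PORT A =====
-- loop state: (rcount, maxcount, time), exactly A's for-loop body
def chooseTimeLoopA : List (Int × String) → Int → Int → Int → Int × Int
  | [], _, maxcount, time => (maxcount, time)
  | t :: rest, rcount, maxcount, time =>
    let rcount' := if t.2 = "start" then rcount + 1 else if t.2 = "end" then rcount - 1 else rcount
    if rcount' > maxcount then chooseTimeLoopA rest rcount' rcount' t.1
    else chooseTimeLoopA rest rcount' maxcount time

def choose_time (t_list : List (Int × String)) : Int × Int :=
  chooseTimeLoopA t_list 0 0 0

-- ===== PORT B =====
-- delta.get(tag, 0)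
def deltaOf (tag : String) : Int := if tag = "start" then 1 else if tag = "end" then -1 else 0

-- the accumulation loop building counts = [(running count, time), …]
def runCounts (r : Int) : List (Int × String) → List (Int × Int)
  | [] => []
  | (t, tag) :: rest => let r' := r + deltaOf tag; (r', t) :: runCounts r' rest

def choose_time_alt (t_list : List (Int × String)) : Int × Int :=
  let counts := runCounts 0 t_list
  let maxcount := (PySem.List.max? (counts.map Prod.fst) (fun y => y)).getD 0
  if maxcount ≤ 0 then (0, 0)
  else
    -- next(t for c, t in counts if c == maxcount); the element exists when maxcount > 0
    let time := ((counts.find? (fun p => p.1 == maxcount)).map Prod.snd).getD 0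
    (maxcount, time)

-- ===== PRECONDITION & SPEC =====
def Spec_choose_time (t_list : List (Int × String)) (out : Int × Int) : Prop := out = choose_time_alt t_list
instance (t_list : List (Int × String)) (out : Int × Int) : Decidable (Spec_choose_time t_list out) := by unfold Spec_choose_time; infer_instance

-- ===== CLAIM (what is proved, stated in full; the proofs are below) =====
def Claim_equal_choose_time : Prop := ∀ (t_list : List (Int × String)), Dom_choose_time t_list → Spec_choose_time t_list (choose_time t_list)

-- ===== LEMMAS AND PROOFS =====

-- A's loop, characterised by the running-count table of B
theorem loopA_char (l : List (Int × String)) : ∀ (r m tm : Int),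
    chooseTimeLoopA l r m tm =
      (let cs := runCounts r l
       let K := (cs.map Prod.fst).foldl max m
       (K, if m < K then ((cs.find? (fun p => p.1 == K)).map Prod.snd).getD tm else tm)) := by
  induction l with
  | nil => intro r m tm; simp [chooseTimeLoopA, runCounts]
  | cons t rest ih =>
    intro r m tm
    obtain ⟨tt, tag⟩ := t
    simp only [chooseTimeLoopA, runCounts]
    have hδ : (if tag = "start" then r + 1 else if tag = "end" then r - 1 else r) = r + deltaOf tag := by
      simp [deltaOf]; split_ifs <;> ring
    rw [hδ]
    set r' := r + deltaOf tag with hr'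
    by_cases h : r' > m
    · simp only [if_pos h]
      rw [ih r' r' tt]
      simp only [List.map_cons, List.foldl_cons]
      have hmax : max m r' = r' := by omega
      rw [hmax]
      set K' := ((runCounts r' rest).map Prod.fst).foldl max r' with hK'
      have hK'ge : r' ≤ K' := (PySem.List.le_foldl_max _ _).1
      simp only [Prod.mk.injEq]
      refine ⟨trivial, ?_⟩
      rcases lt_or_eq_of_le hK'ge with hlt | heq
      · -- K' > r' : head is not the max, and K' occurs in the tail
        have hmem : K' ∈ (runCounts r' rest).map Prod.fst := by
          rcases PySem.List.foldl_max_mem ((runCounts r' rest).map Prod.fst) r' with he | hm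
          · omega
          · exact hm
        have hlt' : m < K' := by omega
        simp only [if_pos hlt', if_pos hlt]
        have hne : (r' == K') = false := by simp; omega
        simp only [List.find?_cons, hne]
        -- find? in the tail succeeds
        obtain ⟨p, hp, hpk⟩ := List.exists_of_mem_map hmem
        have : (runCounts r' rest).find? (fun p => p.1 == K') ≠ none := by
          rw [Ne, List.find?_eq_none]
          push Not
          exact ⟨p, hp, by simp [hpk]⟩
        obtain ⟨q, hq⟩ := Option.ne_none_iff_exists'.mp this
        simp [hq]
      · -- K' = r' : the head is the first maximum
        have h1 : ¬ r' < K' := by omega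
        have hm' : m < K' := by omega
        simp only [if_neg h1, if_pos hm', List.find?_cons]
        simp [← heq]
    · simp only [if_neg h]
      rw [ih r' m tm]
      simp only [List.map_cons, List.foldl_cons]
      have hmax : max m r' = m := by omega
      rw [hmax]
      set K := ((runCounts r' rest).map Prod.fst).foldl max m with hK
      have hKge : m ≤ K := (PySem.List.le_foldl_max _ _).1
      simp only [Prod.mk.injEq]
      refine ⟨trivial, ?_⟩
      by_cases hlt : m < K
      · have hne : (r' == K) = false := by simp; omega
        simp only [if_pos hlt, List.find?_cons, hne]
      · simp [if_neg hlt]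

-- ===== VERDICT (by name: the statement is the Claim_ definition above) =====
theorem choose_time_spec : Claim_equal_choose_time := by
  intro t_list _
  unfold Spec_choose_time choose_time choose_time_alt
  rw [loopA_char]
  generalize runCounts 0 t_list = cs
  cases cs with
  | nil => simp [PySem.List.max?]
  | cons p cs' =>
    obtain ⟨c, t⟩ := p
    simp only [List.map_cons, List.foldl_cons, PySem.List.max?_id_cons, Option.getD_some]
    set M := (cs'.map Prod.fst).foldl max c with hM
    have hcM : c ≤ M := (PySem.List.le_foldl_max _ _).1
    by_cases hpos : M ≤ 0
    · -- all counts ≤ 0: A keeps (0,0), B returns (0,0)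
      have h0 : (cs'.map Prod.fst).foldl max (max 0 c) = 0 := by
        have h1 := (PySem.List.le_foldl_max (cs'.map Prod.fst) (max 0 c)).1
        rcases PySem.List.foldl_max_mem (cs'.map Prod.fst) (max 0 c) with he | hm
        · omega
        · have := (PySem.List.le_foldl_max (cs'.map Prod.fst) c).2 _ hm
          omega
      simp [if_pos hpos, h0]
    · -- M > 0: the fold from 0 equals M, branches agree
      push Not at hpos
      have hfold : (cs'.map Prod.fst).foldl max (max 0 c) = M := by
        have : max (0:Int) c = c ∨ max (0:Int) c = 0 := by omega
        rcases this with he | he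
        · rw [he]
        · rw [he]
          rcases PySem.List.foldl_max_mem (cs'.map Prod.fst) c with h2 | h2
          · omega
          · have hle0 : (cs'.map Prod.fst).foldl max 0 ≤ M := by
              rcases PySem.List.foldl_max_mem (cs'.map Prod.fst) (0:Int) with h3 | h3
              · omega
              · exact (PySem.List.le_foldl_max (cs'.map Prod.fst) c).2 _ h3
            have hge0 : M ≤ (cs'.map Prod.fst).foldl max 0 :=
              (PySem.List.le_foldl_max (cs'.map Prod.fst) (0:Int)).2 _ h2
            omega
      rw [hfold]
      simp [if_neg (not_le.mpr hpos), hpos]
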